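-- pv_equiv track=rewrite | github.com/AhrorSulaymonov/4-oy-6---Dars-uyga-vazifa | 4imtihon1masala.py | harxiltakrorlanish
-- ===== SOURCE A (Python) =====
-- def harxiltakrorlanish(lst : list):
--     countlar = {}
--     for i in lst:
--         countlar[i] = lst.count(i)
--     valuelar = list(countlar.values())
--     for i in valuelar:
--         if valuelar.count(i) > 1:
--             return False
--     return True
-- ===== SOURCE B (Python) =====
-- def harxiltakrorlanish(lst: list):
--     counts = {}
--     for x in lst:
--         counts[x] = counts.get(x, 0) + 1
--     vals = sorted(counts.values())
--     for a, b in zip(vals, vals[1:]):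
--         if a == b:
--             return False
--     return True
-- ===== Notes on version B (the rewrite author's own statement) =====
-- stated objective: faster
-- what changed: Counts are built in one pass with dict.get instead of repeated lst.count, and duplicate counts are detected by sorting the count values and scanning adjacent pairs once, instead of calling values.count inside a loop.
import Mathlib
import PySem

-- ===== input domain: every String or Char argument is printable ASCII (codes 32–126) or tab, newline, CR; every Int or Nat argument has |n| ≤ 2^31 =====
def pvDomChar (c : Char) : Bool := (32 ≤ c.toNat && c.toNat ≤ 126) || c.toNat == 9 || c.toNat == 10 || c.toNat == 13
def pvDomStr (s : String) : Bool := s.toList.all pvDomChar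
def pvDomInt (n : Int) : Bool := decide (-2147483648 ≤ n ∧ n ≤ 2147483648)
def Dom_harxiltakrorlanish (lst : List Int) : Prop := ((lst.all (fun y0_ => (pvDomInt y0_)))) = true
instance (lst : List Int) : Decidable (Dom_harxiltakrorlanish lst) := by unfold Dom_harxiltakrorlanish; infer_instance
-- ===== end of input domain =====

-- B builds counts in one pass and detects duplicate count-values by a sort + adjacent scan,
-- replacing A's quadratic repeated .count scans (objective: faster).


-- ===== PORT A =====
-- 'for i in valuelar: if valuelar.count(i) > 1: return False' fragment
def pvAScan (full : List Int) : List Int → Bool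
  | [] => true
  | i :: rest => if full.count i > 1 then false else pvAScan full rest

def harxiltakrorlanish (lst : List Int) : Bool :=
  let countlar := lst.foldl (fun d i => d.insert i ((lst.count i : Int))) PySem.Dict.empty
  let valuelar := countlar.values
  pvAScan valuelar valuelar

-- ===== PORT B =====
-- 'for a, b in zip(vals, vals[1:]): if a == b: return False' fragment
def pvBScan : List Int → Bool
  | a :: b :: rest => if a == b then false else pvBScan (b :: rest)
  | _ => true

def harxiltakrorlanish_alt (lst : List Int) : Bool :=
  let counts := lst.foldl (fun d x => d.insert x (d.getD x 0 + 1)) PySem.Dict.empty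
  let vals := PySem.List.sorted counts.values (fun x => x) false
  pvBScan vals

-- ===== PRECONDITION & SPEC =====
def Spec_harxiltakrorlanish (lst : List Int) (out : Bool) : Prop := out = harxiltakrorlanish_alt lst
instance (lst : List Int) (out : Bool) : Decidable (Spec_harxiltakrorlanish lst out) := by unfold Spec_harxiltakrorlanish; infer_instance

-- ===== CLAIM (what is proved, stated in full; the proofs are below) =====
def Claim_equal_harxiltakrorlanish : Prop := ∀ (lst : List Int), Dom_harxiltakrorlanish lst → Spec_harxiltakrorlanish lst (harxiltakrorlanish lst)

-- ===== LEMMAS AND PROOFS =====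

-- A's insert loop writes the (key-determined) final count on every visit, so its getD is a lookup by membership
theorem pvGetD_foldl_insert_const (f : Int → Int) (l : List Int) (d : PySem.Dict Int Int) (k : Int) :
    (l.foldl (fun d i => d.insert i (f i)) d).getD k 0 =
      if k ∈ l then f k else d.getD k 0 := by
  induction l generalizing d with
  | nil => simp
  | cons i rest ih =>
    simp only [List.foldl_cons, ih]
    by_cases hk : k ∈ rest
    · simp [hk]
    · by_cases hki : k = i
      · subst hki; simp [hk, PySem.Dict.getD_insert_self]
      · rw [PySem.Dict.getD_insert_of_ne _ _ _ hki]
        simp [hk, hki]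

-- A's dict equals the Counter dict
theorem pvDictA_eq_counter (lst : List Int) :
    lst.foldl (fun d i => d.insert i ((lst.count i : Int))) PySem.Dict.empty =
      PySem.Dict.counter lst := by
  apply PySem.Dict.ext
  have hnd : (lst.foldl (fun d i => d.insert i ((lst.count i : Int))) PySem.Dict.empty).keys.Nodup :=
    PySem.Dict.nodup_keys_foldl_insert _ _ _ (by simp)
  rw [PySem.Dict.items_eq_map_keys _ hnd 0,
      PySem.Dict.items_eq_map_keys _ (PySem.Dict.nodup_keys_counter lst) 0]
  have hkeys : (lst.foldl (fun d i => d.insert i ((lst.count i : Int))) PySem.Dict.empty).keys =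
      PySem.Set.ofList lst := by
    rw [PySem.Dict.keys_foldl_insert]
    simp [PySem.Set.update, PySem.Set.ofList, PySem.Dict.keys_empty]
  rw [hkeys, PySem.Dict.keys_counter]
  apply List.map_congr_left
  intro k hk
  have hk' : k ∈ lst := (PySem.Set.mem_ofList _ _).1 hk
  rw [pvGetD_foldl_insert_const, PySem.Dict.getD_counter]
  simp [hk']

theorem pvAScan_true_iff (full l : List Int) :
    pvAScan full l = true ↔ ∀ i ∈ l, full.count i ≤ 1 := by
  induction l with
  | nil => simp [pvAScan]
  | cons a rest ih =>
    by_cases h : full.count a > 1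
    · simp only [pvAScan, h, if_true]
      constructor
      · intro hF; exact absurd hF (by simp)
      · intro hc; exact absurd (hc a (by simp)) (by omega)
    · simp only [pvAScan, h, if_false, ih]
      constructor
      · intro h2 i hi
        rcases List.mem_cons.1 hi with rfl | hi
        · omega
        · exact h2 i hi
      · intro h2 i hi; exact h2 i (by simp [hi])

theorem pvA_eq_nodup (v : List Int) : pvAScan v v = true ↔ v.Nodup := by
  rw [pvAScan_true_iff, List.nodup_iff_count_le_one]
  constructor
  · intro h i
    by_cases hi : i ∈ v
    · exact h i hi
    · simp [List.count_eq_zero_of_not_mem hi]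
  · intro h i _; exact h i

theorem pvBScan_true_iff (l : List Int) (hs : l.Pairwise (· ≤ ·)) :
    pvBScan l = true ↔ l.Nodup := by
  induction l with
  | nil => simp [pvBScan]
  | cons a rest ih =>
    cases rest with
    | nil => simp [pvBScan]
    | cons b t =>
      rcases List.pairwise_cons.1 hs with ⟨hale, hrest⟩
      by_cases hab : a = b
      · subst hab
        simp only [pvBScan, BEq.rfl, if_true]
        constructor
        · intro hF; exact absurd hF (by simp)
        · intro h; exact absurd (List.nodup_cons.1 h).1 (by simp)
      · have hrec := ih hrest
        have hab' : (a == b) = false := by simp [hab]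
        have hanotin : a ∉ b :: t := by
          rcases List.pairwise_cons.1 hrest with ⟨hble, _⟩
          have halt : a < b := lt_of_le_of_ne (hale b (by simp)) hab
          intro hmem
          rcases List.mem_cons.1 hmem with rfl | hmem
          · exact hab rfl
          · exact absurd rfl (ne_of_gt (lt_of_lt_of_le halt (hble a hmem))).symm
        simp only [pvBScan, hab', Bool.false_eq_true, if_false, hrec]
        constructor
        · intro h; exact List.nodup_cons.2 ⟨hanotin, h⟩
        · intro h; exact (List.nodup_cons.1 h).2

-- ===== VERDICT (by name: the statement is the Claim_ definition above) =====
theorem harxiltakrorlanish_spec : Claim_equal_harxiltakrorlanish := by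
  intro lst _
  unfold Spec_harxiltakrorlanish harxiltakrorlanish harxiltakrorlanish_alt
  rw [pvDictA_eq_counter, PySem.Dict.foldl_insert_getD_add_one_eq_counter]
  set v := (PySem.Dict.counter lst).values with hv
  have hperm : (PySem.List.sorted v (fun x => x) false).Perm v := PySem.List.sorted_perm _ _ _
  have hpw : (PySem.List.sorted v (fun x => x) false).Pairwise (· ≤ ·) :=
    PySem.List.sorted_pairwise _ _
  have h1 := pvA_eq_nodup v
  have h2 := pvBScan_true_iff _ hpw
  rw [hperm.nodup_iff] at h2
  rw [Bool.eq_iff_iff, h1, h2]
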